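-- pv_equiv track=rewrite | github.com/engineerjkk/CodingTest | 백준/Gold/1092. 배/배.py | min_time_to_move_boxes
-- ===== SOURCE A (Python) =====
-- def min_time_to_move_boxes(N, cranes, M, boxes):
--     # 내림차순으로 정렬
--     cranes.sort(reverse=True)
--     boxes.sort(reverse=True)
--
--     # 가장 무거운 박스가 가장 큰 크레인 용량보다 크면 불가능
--     if boxes[0] > cranes[0]:
--         return -1
--
--     # 남은 박스를 저장할 리스트
--     remaining_boxes = boxes[:]
--     time = 0
--
--     # 모든 박스를 옮길 때까지 반복
--     while remaining_boxes:
--         time += 1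
--         box_idx = 0
--
--         # 각 크레인에 대해
--         for crane in cranes:
--             # 남은 박스가 없으면 break
--             if box_idx >= len(remaining_boxes):
--                 break
--
--             # 현재 크레인으로 들 수 있는 가장 무거운 박스 찾기
--             while box_idx < len(remaining_boxes):
--                 if remaining_boxes[box_idx] <= crane:
--                     remaining_boxes.pop(box_idx)
--                     break
--                 box_idx += 1
--
--     return time
-- ===== SOURCE B (Python) =====
-- def min_time_to_move_boxes(N, cranes, M, boxes):
--     # Infeasible iff the heaviest box exceeds the strongest crane (O(n), no sort needed).
--     if max(boxes) > max(cranes):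
--         return -1
--     # Sort descending; then for box i (0-indexed, heaviest first) advance j so that it ends
--     # up as the number of cranes with capacity >= boxes[i] (two pointers: j only grows).
--     # The answer is the maximum over i of ceil((i+1)/j).
--     cranes.sort(reverse=True)
--     boxes.sort(reverse=True)
--     time = 0
--     j = 0
--     for i, b in enumerate(boxes):
--         while j < len(cranes) and cranes[j] >= b:
--             j += 1
--         t = (i + j) // j
--         if t > time:
--             time = t
--     return time
-- ===== Notes on version B (the rewrite author's own statement) =====
-- stated objective: faster
-- what changed: Replaces the round-by-round simulation (repeated crane scans with list.pop) by a closed form: feasibility is tested with max() before sorting, then a single two-pointer pass over the descending-sorted lists computes for each box i the number j of cranes that can lift it, and the answer is max_i ceil((i+1)/j).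
import Mathlib
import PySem

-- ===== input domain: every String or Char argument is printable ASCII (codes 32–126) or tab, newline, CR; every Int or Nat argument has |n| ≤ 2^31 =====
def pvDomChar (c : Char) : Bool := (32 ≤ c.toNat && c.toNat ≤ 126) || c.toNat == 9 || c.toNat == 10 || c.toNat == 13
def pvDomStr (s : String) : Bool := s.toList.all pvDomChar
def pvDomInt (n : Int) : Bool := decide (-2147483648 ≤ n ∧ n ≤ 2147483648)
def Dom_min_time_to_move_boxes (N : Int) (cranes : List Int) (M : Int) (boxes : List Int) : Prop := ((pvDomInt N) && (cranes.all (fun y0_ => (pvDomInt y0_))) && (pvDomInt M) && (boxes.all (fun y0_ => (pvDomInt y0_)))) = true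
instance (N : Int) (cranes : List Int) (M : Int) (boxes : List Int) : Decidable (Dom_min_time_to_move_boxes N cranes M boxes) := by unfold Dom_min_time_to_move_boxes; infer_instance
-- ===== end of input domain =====

-- B replaces A's round-by-round simulation with pops by a closed form (two pointers over the
-- sorted lists, answer = max_i ceil((i+1)/#cranes that lift box i)). A always sorts its two list
-- arguments in place; B sorts them only in the feasible case (it tests feasibility with max()
-- first) — the equivalence proved here is about the return value.

-- ===== PORT A =====

-- inner `while box_idx < len(remaining_boxes): …` of A: scan from index p for the first box ≤ crane,
-- pop it (List.eraseIdx = list.pop at an in-range index); returns (box_idx, remaining_boxes).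
def findPopA (crane : Int) (rem : List Int) (p : Nat) : Nat × List Int :=
  if _h : p < rem.length then
    if rem.getD p 0 ≤ crane then (p, rem.eraseIdx p)   -- rem.getD p 0 = remaining_boxes[box_idx], in range here
    else findPopA crane rem (p + 1)
  else (p, rem)
termination_by rem.length - p
decreasing_by omega

-- body of `for crane in cranes:` — the `break` is equivalent to skipping (box_idx never shrinks)
def craneLoopA (st : Nat × List Int) (crane : Int) : Nat × List Int :=
  if st.1 ≥ st.2.length then st else findPopA crane st.2 st.1

-- the `while remaining_boxes:` loop; fuel = length of the initial box list (each iteration pops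
-- at least one box whenever every box fits the largest crane, which the guard ensures)
def whileA (cranes : List Int) : Nat → Int → List Int → Int
  | 0, time, _ => time
  | fuel + 1, time, rem =>
    if rem = [] then time
    else whileA cranes fuel (time + 1) ((cranes.foldl craneLoopA (0, rem)).2)

def min_time_to_move_boxes (N : Int) (cranes : List Int) (M : Int) (boxes : List Int) : Int :=
  let cs := PySem.List.sorted cranes (fun x => x) true
  let bs := PySem.List.sorted boxes (fun x => x) true
  match PySem.List.pyGet? bs 0, PySem.List.pyGet? cs 0 with
  | some b0, some c0 =>
    if b0 > c0 then -1
    else whileA cs bs.length 0 bs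
  | _, _ => 0   -- boxes[0] / cranes[0] raises IndexError: excluded by Pre_

-- ===== PORT B =====

-- `while j < len(cranes) and cranes[j] >= b: j += 1`
def twoPtrB (cranes : List Int) (b : Int) (j : Nat) : Nat :=
  if _h : j < cranes.length then
    if cranes.getD j 0 ≥ b then twoPtrB cranes b (j + 1) else j
  else j
termination_by cranes.length - j
decreasing_by omega

-- body of `for i, b in enumerate(boxes):`, state = (time, j)
def stepB (cranes : List Int) (st : Int × Nat) (ib : Int × Int) : Int × Nat :=
  let j := twoPtrB cranes ib.2 st.2
  let t := PySem.Int.floordiv (ib.1 + (j : Int)) (j : Int)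
  (if t > st.1 then t else st.1, j)

def min_time_to_move_boxes_alt (N : Int) (cranes : List Int) (M : Int) (boxes : List Int) : Int :=
  match PySem.List.max? boxes (fun x => x) with
  | none => 0   -- max(boxes) raises ValueError: excluded by Pre_
  | some mb =>
    match PySem.List.max? cranes (fun x => x) with
    | none => 0   -- max(cranes) raises ValueError: excluded by Pre_
    | some mc =>
      if mb > mc then -1
      else
        let cs := PySem.List.sorted cranes (fun x => x) true
        let bs := PySem.List.sorted boxes (fun x => x) true
        ((PySem.List.enumerate bs 0).foldl (stepB cs) (0, 0)).1

-- ===== PRECONDITION & SPEC =====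
-- A (and B) evaluate boxes[0] and cranes[0]: an empty list raises IndexError.
def Pre_min_time_to_move_boxes (N : Int) (cranes : List Int) (M : Int) (boxes : List Int) : Prop :=
  cranes ≠ [] ∧ boxes ≠ []
instance (N : Int) (cranes : List Int) (M : Int) (boxes : List Int) : Decidable (Pre_min_time_to_move_boxes N cranes M boxes) := by unfold Pre_min_time_to_move_boxes; infer_instance

def pvWitness_min_time_to_move_boxes : Int × List Int × Int × List Int := (2, [2, 1], 3, [1, 2, 2])

def Spec_min_time_to_move_boxes (N : Int) (cranes : List Int) (M : Int) (boxes : List Int) (out : Int) : Prop := out = min_time_to_move_boxes_alt N cranes M boxes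
instance (N : Int) (cranes : List Int) (M : Int) (boxes : List Int) (out : Int) : Decidable (Spec_min_time_to_move_boxes N cranes M boxes out) := by unfold Spec_min_time_to_move_boxes; infer_instance

-- ===== CLAIM (what is proved, stated in full; the proofs are below) =====
def Claim_equal_min_time_to_move_boxes : Prop := ∀ (N : Int) (cranes : List Int) (M : Int) (boxes : List Int), Dom_min_time_to_move_boxes N cranes M boxes → Pre_min_time_to_move_boxes N cranes M boxes → Spec_min_time_to_move_boxes N cranes M boxes (min_time_to_move_boxes N cranes M boxes)

-- ===== LEMMAS AND PROOFS =====

-- ceiling division on Nat: cD a k = ⌈a / k⌉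
def cD (a k : Nat) : Nat := (a + k - 1) / k

-- Kf cs b = number of cranes in cs that can lift a box of weight b
def Kf (cs : List Int) (b : Int) : Nat := cs.countP (fun c => b ≤ c)

-- one round of the greedy, abstracted to "a box is taken iff more than j cranes can lift it,
-- where j = number of boxes already taken this round"; returns the kept boxes
def kscanB (K : Int → Nat) (j : Nat) : List Int → List Int
  | [] => []
  | b :: R => if j < K b then kscanB K (j + 1) R else b :: kscanB K j R

-- gB K i R = max over positions p (1-based, shifted by i) of ⌈(i+p)/K(R_p)⌉
def gB (K : Int → Nat) (i : Nat) : List Int → Nat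
  | [] => 0
  | b :: R => max (cD (i + 1) (K b)) (gB K (i + 1) R)

-- one round of A's crane loop as a pure two-pointer scan over the remaining boxes
def scanC : List Int → List Int → List Int
  | _, [] => []
  | [], b :: back => b :: back
  | c :: cs, b :: back => if b ≤ c then scanC cs back else b :: scanC (c :: cs) back

-- result of A's inner while: the skipped (too heavy) prefix and the rest after the pop, if any
def scanStep (c : Int) : List Int → Option (List Int × List Int)
  | [] => none
  | b :: t => if b ≤ c then some ([], t) else (scanStep c t).map (fun ht => (b :: ht.1, ht.2))

theorem cD_le_iff {a k n : Nat} (hk : 1 ≤ k) : cD a k ≤ n ↔ a ≤ n * k := by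
  unfold cD
  rw [Nat.div_le_iff_le_mul_add_pred hk, Nat.mul_comm k n]
  omega

theorem le_cD_mul {a k : Nat} (hk : 1 ≤ k) : a ≤ cD a k * k := (cD_le_iff hk).mp le_rfl

theorem cD_pos {a k : Nat} (ha : 1 ≤ a) (hk : 1 ≤ k) : 1 ≤ cD a k := by
  by_contra h
  have := (cD_le_iff hk).mp (show cD a k ≤ 0 by omega)
  omega

theorem cD_mono {a a' k : Nat} (h : a ≤ a') : cD a k ≤ cD a' k :=
  Nat.div_le_div_right (by omega)

theorem cD_add_den {a k : Nat} (hk : 1 ≤ k) : cD (a + k) k = cD a k + 1 := by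
  unfold cD
  have h : a + k + k - 1 = (a + k - 1) + k := by omega
  rw [h, Nat.add_div_right _ (by omega)]

theorem cD_anti {a k k' : Nat} (hk : 1 ≤ k) (hkk : k ≤ k') : cD a k' ≤ cD a k := by
  refine (cD_le_iff (by omega)).mpr (le_trans (le_cD_mul hk) ?_)
  exact Nat.mul_le_mul_left _ hkk

theorem cD_self {k : Nat} (hk : 1 ≤ k) : cD k k = 1 := by
  have h1 := (cD_le_iff hk).mpr (show k ≤ 1 * k by omega)
  have h2 := cD_pos hk hk
  omega

theorem cD_step1 {i j : Nat} (hj : 1 ≤ j) (hji : j ≤ i) : cD (i + 1) (j + 1) ≤ cD (i - j) j + 1 := by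
  refine (cD_le_iff (by omega)).mpr ?_
  have h := le_cD_mul (a := i - j) hj
  have hexp : (cD (i - j) j + 1) * (j + 1) = cD (i - j) j * j + cD (i - j) j + j + 1 := by ring
  omega

theorem cD_step2 {i j : Nat} (hj : 1 ≤ j) (hji : j ≤ i) : cD (i + 1) j ≤ cD (i - j + 1) j + 1 := by
  have h : cD (i + 1) j ≤ cD ((i - j + 1) + j) j := cD_mono (by omega)
  rw [cD_add_den hj] at h
  exact h

theorem upper_lemma (K : Int → Nat) (R : List Int) : ∀ i j : Nat, j ≤ i → (∀ b ∈ R, 1 ≤ K b) →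
    gB K (i - j) (kscanB K j R) ≤ gB K i R - 1 := by
  induction R with
  | nil => intro i j _ _; simp [kscanB, gB]
  | cons b R ih =>
    intro i j hji hK
    have hKb : 1 ≤ K b := hK b (List.mem_cons_self ..)
    have hKR : ∀ b' ∈ R, 1 ≤ K b' := fun b' h => hK b' (List.mem_cons_of_mem _ h)
    simp only [kscanB, gB]
    by_cases htake : j < K b
    · rw [if_pos htake]
      have h1 := ih (i + 1) (j + 1) (by omega) hKR
      have he : i + 1 - (j + 1) = i - j := by omega
      rw [he] at h1
      exact le_trans h1 (Nat.sub_le_sub_right (le_max_right _ _) 1)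
    · rw [if_neg htake]
      have hKj : K b ≤ j := by omega
      have h1 := ih (i + 1) j (by omega) hKR
      have he : i + 1 - j = i - j + 1 := by omega
      rw [he] at h1
      have ha : cD (i - j + 1) (K b) ≤ cD (i + 1) (K b) - 1 := by
        have hq : i + 1 - K b + K b = i + 1 := by omega
        have hd : cD (i + 1 - K b + K b) (K b) = cD (i + 1 - K b) (K b) + 1 := cD_add_den hKb
        rw [hq] at hd
        have hm : cD (i - j + 1) (K b) ≤ cD (i + 1 - K b) (K b) := cD_mono (by omega)
        omega
      simp only [gB]
      apply Nat.max_le.mpr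
      exact ⟨le_trans ha (Nat.sub_le_sub_right (le_max_left _ _) 1),
             le_trans h1 (Nat.sub_le_sub_right (le_max_right _ _) 1)⟩

theorem lower_lemma (K : Int → Nat) (R : List Int) : ∀ i j m : Nat, j ≤ i →
    (∀ b ∈ R, 1 ≤ K b) → R.Pairwise (fun a b => K a ≤ K b) → (∀ b ∈ R, j ≤ K b) →
    (i = j ∨ (1 ≤ j ∧ cD (i - j) j ≤ m)) →
    gB K i R ≤ max m (gB K (i - j) (kscanB K j R)) + 1 := by
  induction R with
  | nil => intro i j m _ _ _ _ _; simp [gB]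
  | cons b R ih =>
    intro i j m hji hK hPW hjK hinv
    have hKb : 1 ≤ K b := hK b (List.mem_cons_self ..)
    have hjKb : j ≤ K b := hjK b (List.mem_cons_self ..)
    have hKR : ∀ b' ∈ R, 1 ≤ K b' := fun b' h => hK b' (List.mem_cons_of_mem _ h)
    rw [List.pairwise_cons] at hPW
    obtain ⟨hhd, hPWR⟩ := hPW
    simp only [kscanB, gB]
    by_cases htake : j < K b
    · rw [if_pos htake]
      have hhead : cD (i + 1) (K b) ≤ max m (gB K (i - j) (kscanB K (j + 1) R)) + 1 := by
        rcases hinv with hij | ⟨hj1, hcm⟩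
        · subst hij
          have : cD (i + 1) (K b) ≤ cD (i + 1) (i + 1) := cD_anti (by omega) (by omega)
          rw [cD_self (by omega)] at this
          omega
        · have h2 : cD (i + 1) (K b) ≤ cD (i + 1) (j + 1) := cD_anti (by omega) (by omega)
          have h3 := cD_step1 hj1 hji
          have h4 : cD (i + 1) (K b) ≤ m + 1 := by omega
          have := Nat.le_max_left m (gB K (i - j) (kscanB K (j + 1) R))
          omega
      have htail := ih (i + 1) (j + 1) m (by omega) hKR hPWR
        (fun b' h => le_trans (by omega) (hhd b' h))
        (by
          rcases hinv with hij | ⟨hj1, hcm⟩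
          · left; omega
          · right
            refine ⟨by omega, ?_⟩
            have he : i + 1 - (j + 1) = i - j := by omega
            rw [he]
            exact le_trans (cD_anti hj1 (by omega)) hcm)
      have he : i + 1 - (j + 1) = i - j := by omega
      rw [he] at htail
      exact Nat.max_le.mpr ⟨hhead, htail⟩
    · rw [if_neg htake]
      have hKbj : K b = j := by omega
      have hj1 : 1 ≤ j := by omega
      simp only [gB]
      -- RHS inner list is b :: kscanB K j R
      have hhead : cD (i + 1) (K b) ≤ cD (i - j + 1) (K b) + 1 := by
        rw [hKbj]; exact cD_step2 hj1 hji
      have htail := ih (i + 1) j (max m (cD (i - j + 1) (K b))) (by omega) hKR hPWR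
        (fun b' h => le_trans (by omega) (hhd b' h))
        (by
          right
          refine ⟨hj1, ?_⟩
          have he : i + 1 - j = i - j + 1 := by omega
          rw [he, ← hKbj]
          exact Nat.le_max_right _ _)
      have he : i + 1 - j = i - j + 1 := by omega
      rw [he] at htail
      -- combine maxes
      have hmax : max (max m (cD (i - j + 1) (K b))) (gB K (i - j + 1) (kscanB K j R))
          = max m (max (cD (i - j + 1) (K b)) (gB K (i - j + 1) (kscanB K j R))) := by
        rw [max_assoc]
      rw [hmax] at htail
      apply Nat.max_le.mpr
      constructor
      · have := Nat.le_max_left (cD (i - j + 1) (K b)) (gB K (i - j + 1) (kscanB K j R))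
        have := Nat.le_max_right m (max (cD (i - j + 1) (K b)) (gB K (i - j + 1) (kscanB K j R)))
        omega
      · exact htail

theorem kscanB_sublist (K : Int → Nat) : ∀ (R : List Int) (j : Nat), (kscanB K j R).Sublist R := by
  intro R
  induction R with
  | nil => intro j; simp [kscanB]
  | cons b R ih =>
    intro j
    simp only [kscanB]
    by_cases h : j < K b
    · rw [if_pos h]; exact (ih (j + 1)).cons b
    · rw [if_neg h]; exact (ih j).cons₂ b

theorem kscanB_length_lt (K : Int → Nat) (b : Int) (R : List Int) (hKb : 1 ≤ K b) :
    (kscanB K 0 (b :: R)).length < (b :: R).length := by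
  simp only [kscanB, if_pos (show 0 < K b by omega)]
  have := (kscanB_sublist K R (0 + 1)).length_le
  simp only [List.length_cons]
  omega

theorem gB_pos (K : Int → Nat) (b : Int) (R : List Int) (i : Nat) (hKb : 1 ≤ K b) :
    1 ≤ gB K i (b :: R) := by
  simp only [gB]
  have := cD_pos (show 1 ≤ i + 1 by omega) hKb
  omega

theorem round_dec (K : Int → Nat) (b : Int) (R : List Int) (hK : ∀ x ∈ b :: R, 1 ≤ K x)
    (hPW : (b :: R).Pairwise (fun a b => K a ≤ K b)) :
    gB K 0 (kscanB K 0 (b :: R)) = gB K 0 (b :: R) - 1 := by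
  have hu := upper_lemma K (b :: R) 0 0 le_rfl hK
  have hl := lower_lemma K (b :: R) 0 0 0 le_rfl hK hPW (fun x _ => Nat.zero_le _) (Or.inl rfl)
  simp only [Nat.sub_zero] at hu hl
  have hmax : max 0 (gB K 0 (kscanB K 0 (b :: R))) = gB K 0 (kscanB K 0 (b :: R)) :=
    Nat.max_eq_right (Nat.zero_le _)
  rw [hmax] at hl
  have := gB_pos K b R 0 (hK b (List.mem_cons_self ..))
  omega

-- --- A's crane loop equals the pure scan ---

theorem getD_append_cons (front : List Int) (b : Int) (t : List Int) :
    (front ++ b :: t).getD front.length 0 = b := by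
  simp [List.getD]

theorem eraseIdx_append_cons (front : List Int) (b : Int) (t : List Int) :
    (front ++ b :: t).eraseIdx front.length = front ++ t := by
  induction front with
  | nil => simp
  | cons x f ih => simpa using ih

theorem findPopA_spec (c : Int) : ∀ (back front : List Int),
    findPopA c (front ++ back) front.length =
      match scanStep c back with
      | some ht => (front.length + ht.1.length, front ++ (ht.1 ++ ht.2))
      | none => ((front ++ back).length, front ++ back) := by
  intro back
  induction back with
  | nil => intro front; rw [findPopA]; simp [scanStep]
  | cons b t ih =>
    intro front
    rw [findPopA]
    have hlt : front.length < (front ++ b :: t).length := by simp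
    rw [dif_pos hlt, getD_append_cons]
    by_cases hbc : b ≤ c
    · rw [if_pos hbc, eraseIdx_append_cons]
      simp [scanStep, hbc]
    · rw [if_neg hbc]
      have h2 : front.length + 1 = (front ++ [b]).length := by simp
      have h3 : front ++ b :: t = (front ++ [b]) ++ t := by simp
      rw [h3, h2, ih (front ++ [b])]
      simp only [scanStep, if_neg hbc]
      cases h : scanStep c t with
      | none => simp
      | some ht => simp; omega

theorem foldl_craneLoopA_stop : ∀ (csl : List Int) (st : Nat × List Int),
    st.2.length ≤ st.1 → csl.foldl craneLoopA st = st := by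
  intro csl
  induction csl with
  | nil => intro st _; rfl
  | cons c csl ih =>
    intro st h
    simp only [List.foldl_cons, craneLoopA, if_pos (show st.1 ≥ st.2.length from h)]
    exact ih st h

theorem scanStep_none_scanC (c : Int) (csl : List Int) : ∀ (back : List Int),
    scanStep c back = none → scanC (c :: csl) back = back := by
  intro back
  induction back with
  | nil => intro _; rfl
  | cons b t ih =>
    intro h
    simp only [scanStep] at h
    by_cases hbc : b ≤ c
    · rw [if_pos hbc] at h; cases h
    · rw [if_neg hbc] at h
      simp only [scanC, if_neg hbc]
      cases hs : scanStep c t with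
      | none => rw [ih hs]
      | some ht => rw [hs] at h; cases h

theorem scanStep_some_scanC (c : Int) (csl : List Int) : ∀ (back h t : List Int),
    scanStep c back = some (h, t) → scanC (c :: csl) back = h ++ scanC csl t := by
  intro back
  induction back with
  | nil => intro h t hs; cases hs
  | cons b back' ih =>
    intro h t hs
    simp only [scanStep] at hs
    by_cases hbc : b ≤ c
    · rw [if_pos hbc] at hs
      cases hs
      simp [scanC, hbc]
    · rw [if_neg hbc] at hs
      cases hs2 : scanStep c back' with
      | none => rw [hs2] at hs; cases hs
      | some ht2 =>
        rw [hs2] at hs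
        simp only [Option.map_some, Option.some.injEq] at hs
        cases hs
        simp only [scanC, if_neg hbc]
        rw [ih ht2.1 ht2.2 (by rw [hs2])]
        simp

theorem foldl_craneLoopA_scan : ∀ (csl : List Int) (front back : List Int),
    (csl.foldl craneLoopA (front.length, front ++ back)).2 = front ++ scanC csl back := by
  intro csl
  induction csl with
  | nil =>
    intro front back
    cases back with
    | nil => simp [scanC]
    | cons b t => simp [scanC]
  | cons c csl ih =>
    intro front back
    cases back with
    | nil =>
      rw [foldl_craneLoopA_stop _ _ (by simp)]
      simp [scanC]
    | cons b t =>
      simp only [List.foldl_cons, craneLoopA]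
      rw [if_neg (by simp)]
      rw [findPopA_spec]
      cases hs : scanStep c (b :: t) with
      | none =>
        simp only
        rw [foldl_craneLoopA_stop _ _ (by simp)]
        rw [scanStep_none_scanC c csl _ hs]
      | some ht =>
        simp only
        have h2 : front.length + ht.1.length = (front ++ ht.1).length := by simp
        have h3 : front ++ (ht.1 ++ ht.2) = (front ++ ht.1) ++ ht.2 := by simp
        rw [h2, h3, ih (front ++ ht.1) ht.2]
        rw [scanStep_some_scanC c csl _ ht.1 ht.2 (by rw [hs])]
        simp

-- --- the scan in terms of Kf: a box is taken iff more cranes than the take-counter can lift it ---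

theorem Kf_le_length (cs : List Int) (b : Int) : Kf cs b ≤ cs.length :=
  List.countP_le_length

theorem sorted_prefix_count : ∀ (ds : List Int), ds.Pairwise (fun a b => b ≤ a) →
    ∀ (j : Nat) (hj : j < ds.length) (b : Int), (b ≤ ds[j] ↔ j < Kf ds b) := by
  intro ds
  induction ds with
  | nil => intro _ j hj; simp at hj
  | cons d ds ih =>
    intro hPW j hj b
    rw [List.pairwise_cons] at hPW
    obtain ⟨hhd, hPWd⟩ := hPW
    have hcnt : Kf (d :: ds) b = Kf ds b + (if b ≤ d then 1 else 0) := by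
      simp only [Kf, List.countP_cons]
      simp
    cases j with
    | zero =>
      simp only [List.getElem_cons_zero]
      constructor
      · intro h; rw [hcnt, if_pos h]; omega
      · intro h
        by_contra hbd
        have hz : Kf ds b = 0 := by
          simp only [Kf]
          rw [List.countP_eq_zero]
          intro x hx
          simp only [decide_eq_true_eq]
          have := hhd x hx
          omega
        rw [hcnt, if_neg hbd, hz] at h
        omega
    | succ j =>
      simp only [List.getElem_cons_succ]
      have hj' : j < ds.length := by simpa using hj
      by_cases hbd : b ≤ d
      · rw [hcnt, if_pos hbd]
        rw [ih hPWd j hj' b]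
        omega
      · have hz : Kf ds b = 0 := by
          simp only [Kf]
          rw [List.countP_eq_zero]
          intro x hx
          simp only [decide_eq_true_eq]
          have := hhd x hx
          omega
        rw [hcnt, if_neg hbd, hz]
        constructor
        · intro h
          exfalso
          have := hhd _ (List.getElem_mem hj')
          omega
        · intro h; omega

theorem kscanB_id (K : Int → Nat) (L : Nat) (hKL : ∀ b, K b ≤ L) :
    ∀ (R : List Int) (j : Nat), L ≤ j → kscanB K j R = R := by
  intro R
  induction R with
  | nil => intro j _; rfl
  | cons b R ih =>
    intro j hLj
    have : ¬ j < K b := by have := hKL b; omega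
    simp only [kscanB, if_neg this]
    rw [ih j hLj]

theorem scanC_eq_kscanB (cs : List Int) (hcs : cs.Pairwise (fun a b => b ≤ a)) :
    ∀ (R : List Int) (j : Nat), scanC (cs.drop j) R = kscanB (Kf cs) j R := by
  intro R
  induction R with
  | nil => intro j; cases cs.drop j <;> rfl
  | cons b R ih =>
    intro j
    by_cases hj : j < cs.length
    · have hdrop : cs.drop j = cs[j] :: cs.drop (j + 1) := List.drop_eq_getElem_cons hj
      rw [hdrop]
      have hiff := sorted_prefix_count cs hcs j hj b
      by_cases htake : b ≤ cs[j]
      · have hK : j < Kf cs b := hiff.mp htake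
        simp only [scanC, if_pos htake, kscanB, if_pos hK]
        rw [← ih (j + 1)]
      · have hK : ¬ j < Kf cs b := fun h => htake (hiff.mpr h)
        simp only [scanC, if_neg htake, kscanB, if_neg hK]
        rw [← ih j, hdrop]
    · have hdrop : cs.drop j = [] := List.drop_eq_nil_of_le (by omega)
      rw [hdrop]
      have hK : ¬ j < Kf cs b := by have := Kf_le_length cs b; omega
      simp only [scanC, kscanB, if_neg hK]
      rw [kscanB_id (Kf cs) cs.length (Kf_le_length cs) R j (by omega)]

-- --- the while loop counts gB rounds ---

theorem whileA_eq (cs : List Int) (hcs : cs.Pairwise (fun a b => b ≤ a)) :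
    ∀ (fuel : Nat) (R : List Int) (t : Int), R.length ≤ fuel →
    (∀ b ∈ R, 1 ≤ Kf cs b) → R.Pairwise (fun a b => Kf cs a ≤ Kf cs b) →
    whileA cs fuel t R = t + (gB (Kf cs) 0 R : Int) := by
  intro fuel
  induction fuel with
  | zero =>
    intro R t hlen _ _
    have : R = [] := List.length_eq_zero_iff.mp (by omega)
    subst this
    simp [whileA, gB]
  | succ fuel ih =>
    intro R t hlen hK hPW
    cases R with
    | nil => simp [whileA, gB]
    | cons b R =>
      rw [whileA, if_neg (by simp)]
      have hround : (cs.foldl craneLoopA (0, b :: R)).2 = kscanB (Kf cs) 0 (b :: R) := by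
        have h0 : (0, b :: R) = ((([] : List Int)).length, ([] : List Int) ++ (b :: R)) := by simp
        rw [h0, foldl_craneLoopA_scan]
        have := scanC_eq_kscanB cs hcs (b :: R) 0
        simpa using this
      rw [hround]
      have hKb : 1 ≤ Kf cs b := hK b (List.mem_cons_self ..)
      have hlt := kscanB_length_lt (Kf cs) b R hKb
      have hsub := kscanB_sublist (Kf cs) (b :: R) 0
      have hrec := ih (kscanB (Kf cs) 0 (b :: R)) (t + 1)
        (by simp only [List.length_cons] at hlt hlen ⊢; omega)
        (fun x hx => hK x (hsub.mem hx))
        (hPW.sublist hsub)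
      rw [hrec]
      have hdec := round_dec (Kf cs) b R hK hPW
      have hpos := gB_pos (Kf cs) b R 0 hKb
      rw [hdec]
      omega

-- --- B's two-pointer advance computes Kf, and its fold computes the running max of gB ---

theorem twoPtrB_eq (cs : List Int) (hcs : cs.Pairwise (fun a b => b ≤ a)) (b : Int) :
    ∀ (j : Nat), j ≤ Kf cs b → twoPtrB cs b j = Kf cs b := by
  have hKle := Kf_le_length cs b
  intro j
  induction hfuel : cs.length - j generalizing j with
  | zero =>
    intro hjK
    rw [twoPtrB, dif_neg (by omega)]
    omega
  | succ n ihn =>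
    intro hjK
    have hj : j < cs.length := by omega
    rw [twoPtrB, dif_pos hj]
    have hgetD : cs.getD j 0 = cs[j] := List.getD_eq_getElem cs 0 hj
    have hiff := sorted_prefix_count cs hcs j hj b
    by_cases hge : cs.getD j 0 ≥ b
    · rw [if_pos hge]
      have hKj : j < Kf cs b := hiff.mp (by rw [← hgetD]; exact hge)
      exact ihn (j + 1) (by omega) (by omega)
    · rw [if_neg hge]
      have : ¬ j < Kf cs b := fun h => hge (by rw [hgetD]; exact hiff.mpr h)
      omega

theorem floordiv_cD (i k : Nat) (hk : 1 ≤ k) :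
    PySem.Int.floordiv ((i : Int) + (k : Int)) (k : Int) = (cD (i + 1) k : Int) := by
  have h1 : ((i : Int) + (k : Int)) = ((i + k : Nat) : Int) := by push_cast; ring
  rw [h1, PySem.Int.floordiv_natCast]
  have h2 : (i + k) / k = cD (i + 1) k := by unfold cD; congr 1; omega
  rw [h2]

theorem foldB_eq (cs : List Int) (hcs : cs.Pairwise (fun a b => b ≤ a)) :
    ∀ (bs : List Int) (i j : Nat) (time : Int),
    (∀ b ∈ bs, 1 ≤ Kf cs b) → (∀ b ∈ bs, j ≤ Kf cs b) →
    bs.Pairwise (fun a b => Kf cs a ≤ Kf cs b) → 0 ≤ time →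
    ((PySem.List.enumerate bs (i : Int)).foldl (stepB cs) (time, j)).1
      = max time ((gB (Kf cs) i bs : Nat) : Int) := by
  intro bs
  induction bs with
  | nil =>
    intro i j time _ _ _ ht
    simp only [PySem.List.enumerate_nil, List.foldl_nil, gB]
    rw [max_eq_left (by exact_mod_cast ht)]
  | cons b bs ih =>
    intro i j time hK1 hjK hPW ht
    have hKb : 1 ≤ Kf cs b := hK1 b (List.mem_cons_self ..)
    have hjKb : j ≤ Kf cs b := hjK b (List.mem_cons_self ..)
    rw [List.pairwise_cons] at hPW
    obtain ⟨hhd, hPWR⟩ := hPW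
    rw [PySem.List.enumerate_cons, List.foldl_cons]
    have hstep : stepB cs (time, j) ((i : Int), b)
        = (max time ((cD (i + 1) (Kf cs b) : Nat) : Int), Kf cs b) := by
      unfold stepB
      simp only
      rw [twoPtrB_eq cs hcs b j hjKb, floordiv_cD i (Kf cs b) hKb]
      congr 1
      by_cases h : ((cD (i + 1) (Kf cs b) : Nat) : Int) > time
      · rw [if_pos h, max_eq_right (le_of_lt h)]
      · rw [if_neg h, max_eq_left (by omega)]
    rw [hstep]
    have hcast : (i : Int) + 1 = ((i + 1 : Nat) : Int) := by push_cast; ring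
    rw [hcast]
    rw [ih (i + 1) (Kf cs b) (max time ((cD (i + 1) (Kf cs b) : Nat) : Int))
      (fun x hx => hK1 x (List.mem_cons_of_mem _ hx)) hhd hPWR
      (le_trans ht (le_max_left _ _))]
    simp only [gB]
    rw [max_assoc]
    congr 1
    rw [Nat.cast_max]

-- ===== VERDICT (by name: the statement is the Claim_ definition above) =====
theorem min_time_to_move_boxes_spec : Claim_equal_min_time_to_move_boxes := by
  intro N cranes M boxes _ hpre
  obtain ⟨hcne, hbne⟩ := hpre
  unfold Spec_min_time_to_move_boxes min_time_to_move_boxes min_time_to_move_boxes_alt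
  dsimp only
  set cs := PySem.List.sorted cranes (fun x => x) true with hcsdef
  set bs := PySem.List.sorted boxes (fun x => x) true with hbsdef
  have hpc : cs.Perm cranes := by rw [hcsdef]; exact PySem.List.sorted_perm cranes (fun x => x) true
  have hpb : bs.Perm boxes := by rw [hbsdef]; exact PySem.List.sorted_perm boxes (fun x => x) true
  have hcsne : cs ≠ [] := by
    intro h; rw [h] at hpc; exact hcne hpc.symm.eq_nil
  have hbsne : bs ≠ [] := by
    intro h; rw [h] at hpb; exact hbne hpb.symm.eq_nil
  obtain ⟨c0, cs', hcs0⟩ := List.exists_cons_of_ne_nil hcsne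
  obtain ⟨b0, bs', hbs0⟩ := List.exists_cons_of_ne_nil hbsne
  have hgetb : PySem.List.pyGet? bs 0 = some b0 := by rw [hbs0]; simp [pysem]
  have hgetc : PySem.List.pyGet? cs 0 = some c0 := by rw [hcs0]; simp [pysem]
  have hcsPW : cs.Pairwise (fun a b => b ≤ a) := by
    have := PySem.List.sorted_pairwise_rev cranes (fun x => x) (κ := Int)
    rw [hcsdef]; simpa using this
  have hbsPW : bs.Pairwise (fun a b => b ≤ a) := by
    have := PySem.List.sorted_pairwise_rev boxes (fun x => x) (κ := Int)
    rw [hbsdef]; simpa using this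
  have hbmax : ∀ b ∈ bs, b ≤ b0 := by
    intro b hb
    rw [hbs0] at hb hbsPW
    rw [List.pairwise_cons] at hbsPW
    rcases List.mem_cons.mp hb with h | h
    · omega
    · exact hbsPW.1 b h
  have hcmax : ∀ c ∈ cs, c ≤ c0 := by
    intro c hc
    rw [hcs0] at hc hcsPW
    rw [List.pairwise_cons] at hcsPW
    rcases List.mem_cons.mp hc with h | h
    · omega
    · exact hcsPW.1 c h
  -- max(boxes) is the head of the descending sort, same for cranes
  obtain ⟨mb, hmb⟩ : ∃ m, PySem.List.max? boxes (fun x => x) = some m := by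
    cases h : PySem.List.max? boxes (fun x => x) with
    | none => exact absurd ((PySem.List.max?_eq_none_iff _ _).mp h) hbne
    | some m => exact ⟨m, rfl⟩
  obtain ⟨mc, hmc⟩ : ∃ m, PySem.List.max? cranes (fun x => x) = some m := by
    cases h : PySem.List.max? cranes (fun x => x) with
    | none => exact absurd ((PySem.List.max?_eq_none_iff _ _).mp h) hcne
    | some m => exact ⟨m, rfl⟩
  have hmbb0 : mb = b0 := by
    have h1 : mb ≤ b0 := hbmax mb (hpb.mem_iff.mpr (PySem.List.max?_mem hmb))
    have h2 : b0 ≤ mb :=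
      PySem.List.max?_isMax hmb b0 (hpb.mem_iff.mp (by rw [hbs0]; exact List.mem_cons_self ..))
    omega
  have hmcc0 : mc = c0 := by
    have h1 : mc ≤ c0 := hcmax mc (hpc.mem_iff.mpr (PySem.List.max?_mem hmc))
    have h2 : c0 ≤ mc :=
      PySem.List.max?_isMax hmc c0 (hpc.mem_iff.mp (by rw [hcs0]; exact List.mem_cons_self ..))
    omega
  rw [hgetb, hgetc, hmb, hmc, hmbb0, hmcc0]
  show (if b0 > c0 then (-1 : Int) else whileA cs bs.length 0 bs)
      = (if b0 > c0 then (-1 : Int) else ((PySem.List.enumerate bs 0).foldl (stepB cs) (0, 0)).1)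
  by_cases hguard : b0 > c0
  · rw [if_pos hguard, if_pos hguard]
  · rw [if_neg hguard, if_neg hguard]
    have hK1 : ∀ b ∈ bs, 1 ≤ Kf cs b := by
      intro b hb
      have : 0 < Kf cs b := by
        apply List.countP_pos_iff.mpr
        refine ⟨c0, by rw [hcs0]; exact List.mem_cons_self .., ?_⟩
        simp only [decide_eq_true_eq]
        have := hbmax b hb
        omega
      omega
    have hPWK : bs.Pairwise (fun a b => Kf cs a ≤ Kf cs b) := by
      refine hbsPW.imp ?_
      intro a b hba
      apply List.countP_mono_left
      intro c _ hc
      simp only [decide_eq_true_eq] at hc ⊢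
      omega
    rw [whileA_eq cs hcsPW bs.length bs 0 le_rfl hK1 hPWK]
    have hfold := foldB_eq cs hcsPW bs 0 0 0 hK1 (fun b _ => Nat.zero_le _) hPWK le_rfl
    rw [show ((0 : Nat) : Int) = (0 : Int) by norm_num] at hfold
    rw [hfold, max_eq_right (by positivity)]
    omega
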